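-- pv_equiv track=rewrite | github.com/JimJin2050/AdventOfCodePython | day10.py | characters_have_been_paired
-- ===== SOURCE A (Python) =====
-- def characters_have_been_paired(characters, left_indexes, end_index):
--     been_paired = False
--     for index in left_indexes:
--         char_list = characters[index: end_index]
--         been_paired = been_paired or all([
--             char_list.count('(') == char_list.count(')'),
--             char_list.count('[') == char_list.count(']'),
--             char_list.count('{') == char_list.count('}'),
--             char_list.count('<') == char_list.count('>')
--         ])
--
--     return been_paired
-- ===== SOURCE B (Python) =====
-- def _net(characters, open_c, close_c):
--     # net[i] = count(open_c) - count(close_c) over characters[:i]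
--     out = [0]
--     t = 0
--     for ch in characters:
--         if ch == open_c:
--             t += 1
--         elif ch == close_c:
--             t -= 1
--         out.append(t)
--     return out
--
--
-- def characters_have_been_paired(characters, left_indexes, end_index):
--     n = len(characters)
--     p = _net(characters, '(', ')')
--     q = _net(characters, '[', ']')
--     r = _net(characters, '{', '}')
--     s = _net(characters, '<', '>')
--
--     def norm(i):
--         if i < 0:
--             i += n
--         return 0 if i < 0 else (n if i > n else i)
--
--     hi = norm(end_index)
--     for index in left_indexes:
--         lo = norm(index)
--         h = hi if hi > lo else lo
--         if p[h] == p[lo] and q[h] == q[lo] and r[h] == r[lo] and s[h] == s[lo]: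
--             return True
--     return False
-- ===== Notes on version B (the rewrite author's own statement) =====
-- stated objective: faster
-- what changed: Replaces A's per-index slicing and four count() scans (O(k*n)) with one precomputed running net-balance list per bracket pair plus Python slice-bound normalisation, so each index is an O(1) check of net[h] == net[lo], with an early return.
import Mathlib
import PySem

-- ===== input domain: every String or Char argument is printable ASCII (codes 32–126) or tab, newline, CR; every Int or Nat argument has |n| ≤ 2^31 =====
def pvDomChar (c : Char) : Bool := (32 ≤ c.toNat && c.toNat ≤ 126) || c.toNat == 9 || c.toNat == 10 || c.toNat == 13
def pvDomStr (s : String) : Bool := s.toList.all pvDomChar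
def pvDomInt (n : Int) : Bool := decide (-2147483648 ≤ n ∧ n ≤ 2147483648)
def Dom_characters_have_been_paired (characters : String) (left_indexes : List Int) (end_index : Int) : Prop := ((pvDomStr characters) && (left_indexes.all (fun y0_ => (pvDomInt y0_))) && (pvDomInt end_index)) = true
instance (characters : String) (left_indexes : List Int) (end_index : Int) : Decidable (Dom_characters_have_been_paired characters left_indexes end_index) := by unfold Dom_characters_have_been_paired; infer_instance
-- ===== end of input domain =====

-- B replaces A's per-index slice-and-count with one running net-balance list per bracket
-- pair and an O(1) balance check per index; objective: faster (measured).

-- ===== PORT A =====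
def characters_have_been_paired (characters : String) (left_indexes : List Int) (end_index : Int) : Bool :=
  left_indexes.foldl (fun been_paired index =>
    let char_list := PySem.List.slice characters.toList (some index) (some end_index)
    been_paired ||
      ((char_list.count '(' == char_list.count ')') &&
       (char_list.count '[' == char_list.count ']') &&
       (char_list.count '{' == char_list.count '}') &&
       (char_list.count '<' == char_list.count '>'))) false

-- ===== PORT B =====
-- net-balance list for one bracket pair: pvNet o c cs = [count o - count c over cs[:0], …, cs[:n]]
def pvNet (o c : Char) (cs : List Char) : List Int :=
  (cs.foldl (fun (st : List Int × Int) ch =>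
      let t := st.2 + (if ch == o then 1 else if ch == c then -1 else 0)
      (st.1 ++ [t], t)) ([0], 0)).1

-- B's norm(i): Python slice-bound normalisation
def pvNorm (n : Nat) (i : Int) : Nat :=
  let j : Int := if i < 0 then i + n else i
  if j < 0 then 0 else if j > (n : Int) then n else j.toNat

-- O(1) balance check for one bracket pair from its net list
def pvBalanced (p : List Int) (lo h : Nat) : Bool :=
  p.getD h 0 == p.getD lo 0

-- early-return loop over the indexes
def pvAltGo (p q r s : List Int) (n hi : Nat) : List Int → Bool
  | [] => false
  | index :: rest =>
    let lo := pvNorm n index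
    let h := if hi > lo then hi else lo
    if pvBalanced p lo h && pvBalanced q lo h &&
       pvBalanced r lo h && pvBalanced s lo h then true
    else pvAltGo p q r s n hi rest

def characters_have_been_paired_alt (characters : String) (left_indexes : List Int) (end_index : Int) : Bool :=
  let cs := characters.toList
  let n := cs.length
  pvAltGo (pvNet '(' ')' cs) (pvNet '[' ']' cs) (pvNet '{' '}' cs) (pvNet '<' '>' cs)
          n (pvNorm n end_index) left_indexes

-- ===== PRECONDITION & SPEC =====
def Spec_characters_have_been_paired (characters : String) (left_indexes : List Int) (end_index : Int) (out : Bool) : Prop := out = characters_have_been_paired_alt characters left_indexes end_index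
instance (characters : String) (left_indexes : List Int) (end_index : Int) (out : Bool) : Decidable (Spec_characters_have_been_paired characters left_indexes end_index out) := by unfold Spec_characters_have_been_paired; infer_instance

-- ===== CLAIM (what is proved, stated in full; the proofs are below) =====
def Claim_equal_characters_have_been_paired : Prop := ∀ (characters : String) (left_indexes : List Int) (end_index : Int), Dom_characters_have_been_paired characters left_indexes end_index → Spec_characters_have_been_paired characters left_indexes end_index (characters_have_been_paired characters left_indexes end_index)

-- ===== LEMMAS AND PROOFS =====

lemma pvNet_go (o c : Char) (hne : o ≠ c) : ∀ (cs : List Char) (acc : List Int) (t : Int),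
    (cs.foldl (fun (st : List Int × Int) ch =>
        let t := st.2 + (if ch == o then 1 else if ch == c then -1 else 0)
        (st.1 ++ [t], t)) (acc, t)).1
      = acc ++ (List.range cs.length).map
          (fun i => t + (((cs.take (i + 1)).count o : Int) - ((cs.take (i + 1)).count c : Int))) := by
  intro cs
  induction cs with
  | nil => simp
  | cons ch cs ih =>
    intro acc t
    simp only [List.foldl_cons, ih, List.length_cons, List.range_succ_eq_map]
    simp [List.count_cons, List.append_assoc, Function.comp]
    refine ⟨?_, ?_⟩
    · by_cases h1 : ch = o <;> by_cases h2 : ch = c <;> simp_all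
    · intro a ha
      by_cases h1 : ch = o <;> by_cases h2 : ch = c <;> simp_all <;> omega

lemma pvNet_getD (o c : Char) (hne : o ≠ c) (cs : List Char) (i : Nat) (h : i ≤ cs.length) :
    (pvNet o c cs).getD i 0 = ((cs.take i).count o : Int) - ((cs.take i).count c : Int) := by
  unfold pvNet
  rw [pvNet_go o c hne]
  cases i with
  | zero => simp
  | succ j =>
    have hj : j < cs.length := by omega
    simp [List.getD, hj]

lemma pvNorm_eq_clampIdx (n : Nat) (i : Int) : pvNorm n i = PySem.List.clampIdx n i := by
  simp only [pvNorm, PySem.List.clampIdx]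
  split_ifs <;> omega

lemma count_slice (cs : List Char) (a b : Int) (c : Char) :
    (PySem.List.slice cs (some a) (some b)).count c
      = (cs.take (max (PySem.List.clampIdx cs.length a) (PySem.List.clampIdx cs.length b))).count c
        - (cs.take (PySem.List.clampIdx cs.length a)).count c := by
  simp only [PySem.List.slice]
  set l := PySem.List.clampIdx cs.length a with hl
  set r := PySem.List.clampIdx cs.length b with hr
  rcases Nat.lt_or_ge l r with hlt | hge
  · have hmax : max l r = r := max_eq_right (Nat.le_of_lt hlt)
    have hsplit : cs.take r = cs.take l ++ (cs.drop l).take (r - l) := by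
      rw [← List.take_add]
      congr 1
      omega
    rw [hmax, hsplit, List.count_append]
    omega
  · have : r - l = 0 := by omega
    simp [this, max_eq_left hge]

-- the per-index check of B equals the per-index check of A
lemma check_eq (cs : List Char) (index end_index : Int) :
    (let lo := pvNorm cs.length index
     let h := if pvNorm cs.length end_index > lo then pvNorm cs.length end_index else lo
     pvBalanced (pvNet '(' ')' cs) lo h &&
     pvBalanced (pvNet '[' ']' cs) lo h &&
     pvBalanced (pvNet '{' '}' cs) lo h &&
     pvBalanced (pvNet '<' '>' cs) lo h)
    = (let char_list := PySem.List.slice cs (some index) (some end_index)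
       (char_list.count '(' == char_list.count ')') &&
       (char_list.count '[' == char_list.count ']') &&
       (char_list.count '{' == char_list.count '}') &&
       (char_list.count '<' == char_list.count '>')) := by
  simp only [pvNorm_eq_clampIdx]
  set l := PySem.List.clampIdx cs.length index with hl
  set hb := PySem.List.clampIdx cs.length end_index with hhb
  have hifmax : (if hb > l then hb else l) = max l hb := by
    rcases Nat.lt_or_ge l hb with h | h
    · rw [if_pos h, max_eq_right (Nat.le_of_lt h)]
    · rw [if_neg (by omega), max_eq_left h]
  have hln : l ≤ cs.length := PySem.List.clampIdx_le _ _
  have hbn : hb ≤ cs.length := PySem.List.clampIdx_le _ _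
  have hmn : max l hb ≤ cs.length := by omega
  have key : ∀ o k : Char, o ≠ k →
      pvBalanced (pvNet o k cs) l (if hb > l then hb else l)
        = ((PySem.List.slice cs (some index) (some end_index)).count o ==
           (PySem.List.slice cs (some index) (some end_index)).count k) := by
    intro o k hne
    have hmono : ∀ c : Char, (cs.take l).count c ≤ (cs.take (max l hb)).count c := by
      intro c
      have hsplit : cs.take (max l hb) = cs.take l ++ (cs.drop l).take (max l hb - l) := by
        rw [← List.take_add]
        congr 1
        omega
      rw [hsplit, List.count_append]
      omega
    have ho := hmono o
    have hk := hmono k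
    simp only [pvBalanced, hifmax, pvNet_getD o k hne cs _ hln, pvNet_getD o k hne cs _ hmn,
      count_slice cs index end_index, ← hl, ← hhb]
    rw [Bool.eq_iff_iff]
    simp only [beq_iff_eq]
    constructor <;> intro hEq <;> omega
  rw [key '(' ')' (by decide), key '[' ']' (by decide),
      key '{' '}' (by decide), key '<' '>' (by decide)]

lemma foldl_or_eq (f : Int → Bool) (xs : List Int) (b : Bool) :
    xs.foldl (fun acc i => acc || f i) b = (b || xs.any f) := by
  induction xs generalizing b with
  | nil => simp
  | cons x xs ih => simp [ih, Bool.or_assoc]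

lemma pv_if_true_else (c b : Bool) : (if c = true then true else b) = (c || b) := by
  cases c <;> simp

lemma pvAltGo_eq_any (p q r s : List Int) (n hi : Nat) (xs : List Int) :
    pvAltGo p q r s n hi xs
      = xs.any (fun index =>
          let lo := pvNorm n index
          let h := if hi > lo then hi else lo
          pvBalanced p lo h && pvBalanced q lo h &&
          pvBalanced r lo h && pvBalanced s lo h) := by
  induction xs with
  | nil => rfl
  | cons x xs ih =>
    simp only [pvAltGo, ih, List.any_cons, pv_if_true_else]

-- ===== VERDICT (by name: the statement is the Claim_ definition above) =====
theorem characters_have_been_paired_spec : Claim_equal_characters_have_been_paired := by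
  intro characters left_indexes end_index _
  unfold Spec_characters_have_been_paired
  unfold characters_have_been_paired characters_have_been_paired_alt
  rw [foldl_or_eq, pvAltGo_eq_any]
  simp only [Bool.false_or]
  congr 1
  funext index
  exact (check_eq characters.toList index end_index).symm
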